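-- pv_equiv track=rewrite | github.com/Shinyhash/python-tasks | 3 - One-Dimensional Arrays/3.12.py | calculate_sum_and_count
-- ===== SOURCE A (Python) =====
-- def calculate_sum_and_count(F):
--     sum_result = 0
--     count_33 = 0
--
--     for i in range(len(F)):
--         if F[i] != 33:
--             sum_result += F[i]
--         else:
--             count_33 += 1
--
--     return sum_result, count_33
-- ===== SOURCE B (Python) =====
-- def calculate_sum_and_count(F):
--     # Divide and conquer over index ranges: combine (sum, count) of halves.
--     def go(lo, hi):
--         n = hi - lo
--         if n == 0:
--             return (0, 0)
--         if n == 1: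
--             v = F[lo]
--             return (0, 1) if v == 33 else (v, 0)
--         mid = (lo + hi) // 2
--         s1, c1 = go(lo, mid)
--         s2, c2 = go(mid, hi)
--         return (s1 + s2, c1 + c2)
--     return go(0, len(F))
-- ===== Notes on version B (the rewrite author's own statement) =====
-- stated objective: alternative
-- what changed: Replaces A's single left-to-right index loop with a branch by a divide-and-conquer recursion that splits the index range in half, computes (sum, count) of each half, and combines them; correctness follows because sum and count are associative under concatenation.
import Mathlib
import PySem

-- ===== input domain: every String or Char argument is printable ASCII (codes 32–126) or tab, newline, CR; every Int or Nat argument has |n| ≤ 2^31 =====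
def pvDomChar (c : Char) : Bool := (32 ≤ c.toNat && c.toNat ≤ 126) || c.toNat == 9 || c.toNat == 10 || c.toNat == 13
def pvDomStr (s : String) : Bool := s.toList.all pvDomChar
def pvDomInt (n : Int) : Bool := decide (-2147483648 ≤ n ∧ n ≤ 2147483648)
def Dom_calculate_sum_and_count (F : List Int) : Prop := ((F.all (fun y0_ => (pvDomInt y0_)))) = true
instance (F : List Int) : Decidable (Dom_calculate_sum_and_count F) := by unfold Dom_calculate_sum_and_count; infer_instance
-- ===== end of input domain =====

-- B replaces A's single left-to-right branched index loop by a divide-and-conquer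
-- recursion on index ranges that combines (sum, count) of the two halves; same cost.

-- ===== PORT A =====
-- for i in range(len(F)): branch on F[i] != 33  (F[i] via pyGetD; the index is always in range, so exact)
def calculate_sum_and_count (F : List Int) : Int × Int :=
  (PySem.List.pyRange 0 (F.length : Int) 1).foldl
    (fun (acc : Int × Int) i =>
      if PySem.List.pyGetD F i 0 ≠ 33 then (acc.1 + PySem.List.pyGetD F i 0, acc.2)
      else (acc.1, acc.2 + 1)) (0, 0)

-- ===== PORT B =====
-- go(lo, hi): Python tests 'n == 0'; go is only ever called with lo ≤ hi, and the
-- '≤ 0' form of the same test merely totalizes the recursion (it changes nothing on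
-- reachable calls).  F[lo] via pyGetD (lo always in range here, so exact).
def csacGo (F : List Int) (lo hi : Int) : Int × Int :=
  if hi - lo ≤ 0 then (0, 0)
  else if hi - lo = 1 then
    (if PySem.List.pyGetD F lo 0 = 33 then ((0 : Int), (1 : Int))
     else (PySem.List.pyGetD F lo 0, (0 : Int)))
  else
    let mid := PySem.Int.floordiv (lo + hi) 2
    let p1 := csacGo F lo mid
    let p2 := csacGo F mid hi
    (p1.1 + p2.1, p1.2 + p2.2)
termination_by (hi - lo).toNat
decreasing_by
  · rw [PySem.Int.floordiv_eq_ediv_of_pos (by omega)]; omega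
  · rw [PySem.Int.floordiv_eq_ediv_of_pos (by omega)]; omega

def calculate_sum_and_count_alt (F : List Int) : Int × Int :=
  csacGo F 0 (F.length : Int)

-- ===== PRECONDITION & SPEC =====
def Spec_calculate_sum_and_count (F : List Int) (out : Int × Int) : Prop := out = calculate_sum_and_count_alt F
instance (F : List Int) (out : Int × Int) : Decidable (Spec_calculate_sum_and_count F out) := by unfold Spec_calculate_sum_and_count; infer_instance

-- ===== CLAIM (what is proved, stated in full; the proofs are below) =====
def Claim_equal_calculate_sum_and_count : Prop := ∀ (F : List Int), Dom_calculate_sum_and_count F → Spec_calculate_sum_and_count F (calculate_sum_and_count F)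

-- ===== LEMMAS AND PROOFS =====

-- A's loop computes the filtered sum and the count of 33s.
theorem loop_eq (F : List Int) (s c : Int) :
    F.foldl (fun (acc : Int × Int) v =>
      if v ≠ 33 then (acc.1 + v, acc.2) else (acc.1, acc.2 + 1)) (s, c)
    = (s + (F.filter (fun v => v ≠ 33)).sum, c + (F.count 33 : Int)) := by
  induction F generalizing s c with
  | nil => simp
  | cons x xs ih =>
    rw [List.foldl_cons]
    by_cases h : x = 33
    · subst h
      simp only [ne_eq, not_true_eq_false, if_false, ih, List.filter_cons, List.count_cons]
      simp [Prod.ext_iff]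
      ring
    · simp only [ne_eq, h, not_false_eq_true, if_true, ih, List.filter_cons, List.count_cons]
      simp [h, Prod.ext_iff]
      ring

-- B's recursion computes the filtered sum and the count of 33s of the segment [lo, hi).
theorem csacGo_eq (F : List Int) : ∀ (n : Nat) (lo hi : Int), 0 ≤ lo → lo ≤ hi →
    hi ≤ (F.length : Int) → (hi - lo).toNat = n →
    csacGo F lo hi =
      ((((F.drop lo.toNat).take n).filter (fun v => v ≠ 33)).sum,
       (((F.drop lo.toNat).take n).count 33 : Int)) := by
  intro n
  induction n using Nat.strong_induction_on with
  | _ n ih =>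
    intro lo hi h0 hlh hhl hn
    rw [csacGo]
    by_cases hz : hi - lo ≤ 0
    · have : n = 0 := by omega
      subst this
      simp [hz]
    · rw [if_neg hz]
      by_cases h1 : hi - lo = 1
      · have hn1 : n = 1 := by omega
        subst hn1
        have hlt : lo.toNat < F.length := by omega
        have hseg : (F.drop lo.toNat).take 1 = [F[lo.toNat]] := by
          rw [List.take_one, List.head?_drop]
          simp [List.getElem?_eq_getElem hlt]
        rw [if_pos h1, PySem.List.pyGetD_eq_getElem F 0 h0 (by omega), hseg]
        by_cases hv : F[lo.toNat] = 33 <;> simp [hv]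
      · rw [if_neg h1]
        have h2 : 2 ≤ hi - lo := by omega
        set mid := PySem.Int.floordiv (lo + hi) 2 with hmid
        have hmid' : mid = (lo + hi) / 2 := by
          rw [hmid, PySem.Int.floordiv_eq_ediv_of_pos (by omega)]
        have hb1 : lo < mid := by omega
        have hb2 : mid < hi := by omega
        have e1 := ih (mid - lo).toNat (by omega) lo mid h0 (by omega) (by omega) rfl
        have e2 := ih (hi - mid).toNat (by omega) mid hi (by omega) (by omega) hhl rfl
        simp only [e1, e2]
        have hsplit : (F.drop lo.toNat).take n =
            (F.drop lo.toNat).take (mid - lo).toNat ++ (F.drop mid.toNat).take (hi - mid).toNat := by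
          have hadd : n = (mid - lo).toNat + (hi - mid).toNat := by omega
          rw [hadd, List.take_add, List.drop_drop,
            show lo.toNat + (mid - lo).toNat = mid.toNat from by omega]
        rw [hsplit]
        simp [List.filter_append, List.sum_append, List.count_append]

-- ===== VERDICT (by name: the statement is the Claim_ definition above) =====
theorem calculate_sum_and_count_spec : Claim_equal_calculate_sum_and_count := by
  intro F _
  unfold Spec_calculate_sum_and_count calculate_sum_and_count calculate_sum_and_count_alt
  have h := PySem.List.foldl_pyRange_pyGetD (a := 0) (xs := F) (d := 0)
    (f := fun (acc : Int × Int) v => if v ≠ 33 then (acc.1 + v, acc.2) else (acc.1, acc.2 + 1))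
    (init := ((0 : Int), (0 : Int))) (le_refl 0)
  have hl := loop_eq F 0 0
  have hb := csacGo_eq F F.length 0 (F.length : Int) (le_refl 0) (by positivity) (le_refl _) (by simp)
  simp only [ne_eq, ite_not] at h hl ⊢
  simp [PySem.List.len] at h
  rw [h, hl, hb]
  simp
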